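-- pv_equiv track=rewrite | github.com/MayukhAmerB/STreamX | backend/apps/realtime/models.py | _normalize_user_id_list
-- ===== SOURCE A (Python) =====
-- def _normalize_user_id_list(raw_values):
--     normalized = []
--     seen = set()
--     for value in raw_values or []:
--         try:
--             user_id = int(value)
--         except (TypeError, ValueError):
--             continue
--         if user_id <= 0 or user_id in seen:
--             continue
--         normalized.append(user_id)
--         seen.add(user_id)
--     return sorted(normalized)
-- ===== SOURCE B (Python) =====
-- def _normalize_user_id_list(raw_values):
--     values = []
--     for value in raw_values or []:
--         try:
--             user_id = int(value)
--         except (TypeError, ValueError):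
--             continue
--         if user_id <= 0:
--             continue
--         values.append(user_id)
--     values.sort()
--     result = []
--     for value in values:
--         if not result or result[-1] != value:
--             result.append(value)
--     return result
-- ===== Notes on version B (the rewrite author's own statement) =====
-- stated objective: alternative
-- what changed: Drops the 'seen' hash set: B appends every positive id (duplicates included), sorts the list, and removes duplicates in one adjacency pass over the sorted list.
import Mathlib
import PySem

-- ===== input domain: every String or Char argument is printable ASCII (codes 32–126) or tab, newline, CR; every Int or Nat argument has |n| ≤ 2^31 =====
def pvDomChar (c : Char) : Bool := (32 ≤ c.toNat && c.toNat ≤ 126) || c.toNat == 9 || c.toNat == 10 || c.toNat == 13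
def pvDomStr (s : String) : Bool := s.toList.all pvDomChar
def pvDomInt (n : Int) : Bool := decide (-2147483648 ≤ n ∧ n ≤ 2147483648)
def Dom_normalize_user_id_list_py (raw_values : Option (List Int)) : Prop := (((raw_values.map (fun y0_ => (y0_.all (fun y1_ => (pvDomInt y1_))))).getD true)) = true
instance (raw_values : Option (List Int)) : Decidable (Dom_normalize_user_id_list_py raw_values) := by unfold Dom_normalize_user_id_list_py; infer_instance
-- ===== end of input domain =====

-- B drops A's 'seen' hash set: it collects every positive id (duplicates included), sorts,
-- and removes duplicates in one adjacency pass over the sorted list; same return value.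

-- ===== PORT A =====
-- 'raw_values or []': None (and the falsy empty list) become []; on Int elements
-- int(value) is the value itself and never raises, so the try/except never fires.
def normalize_user_id_list_py (raw_values : Option (List Int)) : List Int :=
  let xs := match raw_values with | none => [] | some l => l
  let st := xs.foldl (fun (s : List Int × PySem.Set Int) value =>
      let user_id := value
      if user_id ≤ 0 ∨ PySem.Set.contains s.2 user_id = true then s
      else (s.1 ++ [user_id], PySem.Set.add s.2 user_id)) ([], PySem.Set.empty)
  PySem.List.sorted st.1 (fun x => x) false

-- ===== PORT B =====
def normalize_user_id_list_py_alt (raw_values : Option (List Int)) : List Int :=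
  let xs := match raw_values with | none => [] | some l => l
  let values := xs.foldl (fun acc value =>
      let user_id := value
      if user_id ≤ 0 then acc else acc ++ [user_id]) []
  let values := PySem.List.sorted values (fun x => x) false
  values.foldl (fun result value =>
      if result = [] ∨ result.getLast? ≠ some value then result ++ [value] else result) []

-- ===== PRECONDITION & SPEC =====
def Spec_normalize_user_id_list_py (raw_values : Option (List Int)) (out : List Int) : Prop := out = normalize_user_id_list_py_alt raw_values
instance (raw_values : Option (List Int)) (out : List Int) : Decidable (Spec_normalize_user_id_list_py raw_values out) := by unfold Spec_normalize_user_id_list_py; infer_instance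

-- ===== CLAIM (what is proved, stated in full; the proofs are below) =====
def Claim_equal_normalize_user_id_list_py : Prop := ∀ (raw_values : Option (List Int)), Dom_normalize_user_id_list_py raw_values → Spec_normalize_user_id_list_py raw_values (normalize_user_id_list_py raw_values)

-- ===== LEMMAS AND PROOFS =====

/-- A's loop keeps 'seen' equal (as a list) to 'normalized': the paired fold collapses
    to a single fold with `PySem.Set.add` on positive values. -/
lemma a_fold_pair (xs : List Int) : ∀ n : List Int,
    xs.foldl (fun (s : List Int × PySem.Set Int) value =>
        if value ≤ 0 ∨ PySem.Set.contains s.2 value = true then s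
        else (s.1 ++ [value], PySem.Set.add s.2 value)) (n, n)
      = (xs.foldl (fun n v => if v ≤ 0 then n else PySem.Set.add n v) n,
         xs.foldl (fun n v => if v ≤ 0 then n else PySem.Set.add n v) n) := by
  induction xs with
  | nil => intro n; rfl
  | cons v t ih =>
    intro n
    simp only [List.foldl_cons]
    have hstep : (if v ≤ 0 ∨ PySem.Set.contains n v = true then ((n, n) : List Int × PySem.Set Int)
          else (n ++ [v], PySem.Set.add n v))
        = (if v ≤ 0 then n else PySem.Set.add n v, if v ≤ 0 then n else PySem.Set.add n v) := by
      by_cases h0 : v ≤ 0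
      · rw [if_pos (Or.inl h0), if_pos h0]
      · rw [if_neg h0]
        by_cases hc : PySem.Set.contains n v = true
        · rw [if_pos (Or.inr hc)]
          have : PySem.Set.add n v = n := by rw [PySem.Set.add, if_pos hc]
          rw [this]
        · have hadd : PySem.Set.add n v = n ++ [v] := by
            rw [PySem.Set.add, if_neg (by simpa using hc)]
          rw [if_neg (by tauto), hadd]
    rw [hstep]
    exact ih _

/-- elements of a strictly increasing list are ≤ its last element -/
lemma le_getLast_of_pairwise_lt : ∀ (res : List Int) (m : Int),
    res.Pairwise (· < ·) → res.getLast? = some m → ∀ a ∈ res, a ≤ m := by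
  intro res
  induction res with
  | nil => intro m _ h; simp at h
  | cons x t ih =>
    intro m hp hl a ha
    cases t with
    | nil =>
      simp at hl ha; omega
    | cons y u =>
      rw [List.getLast?_cons_cons] at hl
      rcases List.mem_cons.mp ha with rfl | hat
      · have hm : m ∈ y :: u := by
          obtain ⟨t', ht⟩ := List.getLast?_eq_some_iff.mp hl
          rw [ht]; simp
        have := (List.pairwise_cons.mp hp).1 m hm
        omega
      · exact ih m (List.pairwise_cons.mp hp).2 hl a hat

/-- the adjacency-dedup fold on a ≤-sorted tail extends a <-sorted accumulator to a
    <-sorted list with the union of the members -/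
lemma ded_go : ∀ (s res : List Int),
    res.Pairwise (· < ·) → s.Pairwise (· ≤ ·) →
    (∀ m, res.getLast? = some m → ∀ v ∈ s, m ≤ v) →
    (s.foldl (fun result value =>
        if result = [] ∨ result.getLast? ≠ some value then result ++ [value] else result) res).Pairwise (· < ·)
    ∧ ∀ x, (x ∈ s.foldl (fun result value =>
        if result = [] ∨ result.getLast? ≠ some value then result ++ [value] else result) res ↔ x ∈ res ∨ x ∈ s) := by
  intro s
  induction s with
  | nil => intro res h1 _ _; exact ⟨h1, by simp⟩
  | cons v t ih =>
    intro res h1 h2 h3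
    simp only [List.foldl_cons]
    by_cases hl : res.getLast? = some v
    · -- duplicate of the last kept element: skipped
      have hne : res ≠ [] := by intro h; rw [h] at hl; simp at hl
      rw [if_neg (by simp [hne, hl])]
      have hv : v ∈ res := by
        obtain ⟨t', rfl⟩ := List.getLast?_eq_some_iff.mp hl; simp
      obtain ⟨p1, p2⟩ := ih res h1 (List.pairwise_cons.mp h2).2
        (fun m hm w hw => by
          rw [hl] at hm; cases hm
          exact (List.pairwise_cons.mp h2).1 w hw)
      refine ⟨p1, fun x => ?_⟩
      rw [p2 x]
      constructor
      · rintro (h | h)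
        · exact Or.inl h
        · exact Or.inr (List.mem_cons_of_mem _ h)
      · rintro (h | h)
        · exact Or.inl h
        · rcases List.mem_cons.mp h with rfl | h
          · exact Or.inl hv
          · exact Or.inr h
    · -- new value: appended
      rw [if_pos (Or.inr hl)]
      have hlt : ∀ a ∈ res, a < v := by
        intro a ha
        cases hres : res.getLast? with
        | none => rw [List.getLast?_eq_none_iff] at hres; simp [hres] at ha
        | some m =>
          have hm : m ≤ v := h3 m hres v (List.mem_cons_self)
          have hmv : m ≠ v := fun h => hl (by rw [hres, h])
          have := le_getLast_of_pairwise_lt res m h1 hres a ha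
          omega
      have h1' : (res ++ [v]).Pairwise (· < ·) := by
        rw [List.pairwise_append]
        exact ⟨h1, List.pairwise_singleton _ _, by simpa using hlt⟩
      obtain ⟨p1, p2⟩ := ih (res ++ [v]) h1' (List.pairwise_cons.mp h2).2
        (fun m hm w hw => by
          rw [List.getLast?_concat] at hm; cases hm
          exact (List.pairwise_cons.mp h2).1 w hw)
      refine ⟨p1, fun x => ?_⟩
      rw [p2 x]
      simp only [List.mem_append, List.mem_cons]
      tauto

/-- B's result on any list of values: strictly increasing, with the same members -/
lemma ded_spec (l : List Int) :
    ((PySem.List.sorted l (fun x => x) false).foldl (fun result value =>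
        if result = [] ∨ result.getLast? ≠ some value then result ++ [value] else result) []).Pairwise (· < ·)
    ∧ ∀ x, (x ∈ (PySem.List.sorted l (fun x => x) false).foldl (fun result value =>
        if result = [] ∨ result.getLast? ≠ some value then result ++ [value] else result) [] ↔ x ∈ l) := by
  have hs : (PySem.List.sorted l (fun x => x) false).Pairwise (· ≤ ·) :=
    PySem.List.sorted_pairwise l (fun x => x)
  obtain ⟨p1, p2⟩ := ded_go (PySem.List.sorted l (fun x => x) false) []
    (List.Pairwise.nil) hs (by intro m hm; simp at hm)
  refine ⟨p1, fun x => ?_⟩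
  rw [p2 x]
  simp [PySem.List.mem_sorted]

theorem normalize_user_id_list_py_spec : Claim_equal_normalize_user_id_list_py := by
  intro raw_values _
  unfold Spec_normalize_user_id_list_py normalize_user_id_list_py normalize_user_id_list_py_alt
  set xs := (match raw_values with | none => ([] : List Int) | some l => l) with hxs
  simp only
  rw [show (([], PySem.Set.empty) : List Int × PySem.Set Int) = (([], []) : List Int × PySem.Set Int) from rfl,
      a_fold_pair]
  -- A's kept values are set(filter positive)
  have hA : xs.foldl (fun n v => if v ≤ 0 then n else PySem.Set.add n v) []
      = PySem.Set.ofList (xs.filter (fun v => decide (0 < v))) := by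
    rw [PySem.Set.ofList_eq_foldl, ← PySem.List.foldl_ite_eq_foldl_filter (p := fun v => 0 < v)]
    exact PySem.List.foldl_congr_mem (l := xs) (init := ([] : PySem.Set Int))
      (f := fun (n : PySem.Set Int) (v : Int) => if v ≤ 0 then n else PySem.Set.add n v)
      (g := fun (acc : PySem.Set Int) (x : Int) => if 0 < x then PySem.Set.add acc x else acc) (h := by
      intro acc x _
      by_cases h : x ≤ 0
      · simp [h, show ¬ (0 : Int) < x from by omega]
      · simp [h, show (0 : Int) < x from by omega])
  -- B's collected values are filter positive
  have hB : xs.foldl (fun acc v => if v ≤ 0 then acc else acc ++ [v]) []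
      = xs.filter (fun v => decide (0 < v)) := by
    rw [PySem.List.foldl_congr_mem
      (f := fun acc v => if v ≤ 0 then acc else acc ++ [v])
      (g := fun acc x => if 0 < x then acc ++ [x] else acc) (h := by
      intro acc x _
      by_cases h : x ≤ 0
      · simp [h, show ¬ (0 : Int) < x from by omega]
      · simp [h, show (0 : Int) < x from by omega])]
    simpa using PySem.List.foldl_append_ite_eq_filter (p := fun (v : Int) => 0 < v) (l := xs) (acc := [])
  rw [hA, hB]
  set P := xs.filter (fun v => decide (0 < v)) with hP
  obtain ⟨p1, p2⟩ := ded_spec P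
  set ded := (PySem.List.sorted P (fun x => x) false).foldl (fun result value =>
      if result = [] ∨ result.getLast? ≠ some value then result ++ [value] else result) [] with hded
  have hnd : ded.Nodup := p1.imp (fun h => ne_of_lt h)
  have hperm : ded.Perm (PySem.Set.ofList P) :=
    (List.perm_ext_iff_of_nodup hnd (PySem.Set.nodup_ofList P)).mpr
      (fun x => by rw [p2 x, PySem.Set.mem_ofList])
  exact PySem.List.sorted_eq_of_perm_of_pairwise_lt _ _ _ hperm p1
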